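-- pv_equiv track=rewrite | github.com/shubhamgbits/leetcode-python | 3. sliding_window/minimum-window-substring-try-3.py | check_substring
-- ===== SOURCE A (Python) =====
-- def check_substring(window, char_map):
--     window_count = {}
--     for char in window:
--         window_count[char] = window_count.get(char, 0) + 1
--
--     for char, count in char_map.items():
--         if window_count.get(char, 0) < count:
--             return False
--     return True
-- ===== SOURCE B (Python) =====
-- def check_substring(window, char_map):
--     # Single-pass deficit tracking: fold requirements into a positive-max 'need'
--     # table, then consume window chars, decrementing a global 'missing' counter.
--     need = {}
--     for char, count in char_map.items():
--         if count > need.get(char, 0):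
--             need[char] = count
--     missing = sum(need.values())
--     for c in window:
--         r = need.get(c, 0)
--         if r > 0:
--             need[c] = r - 1
--             missing -= 1
--     return missing == 0
-- ===== Notes on version B (the rewrite author's own statement) =====
-- stated objective: alternative
-- what changed: B replaces A's build-full-window-count-then-verify-each-requirement scheme with incremental deficit tracking: it folds the requirements into a positive-max need table plus a single 'missing' total, then consumes window characters one by one, decrementing the remaining deficit, and answers by whether the deficit reached zero.
import Mathlib
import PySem

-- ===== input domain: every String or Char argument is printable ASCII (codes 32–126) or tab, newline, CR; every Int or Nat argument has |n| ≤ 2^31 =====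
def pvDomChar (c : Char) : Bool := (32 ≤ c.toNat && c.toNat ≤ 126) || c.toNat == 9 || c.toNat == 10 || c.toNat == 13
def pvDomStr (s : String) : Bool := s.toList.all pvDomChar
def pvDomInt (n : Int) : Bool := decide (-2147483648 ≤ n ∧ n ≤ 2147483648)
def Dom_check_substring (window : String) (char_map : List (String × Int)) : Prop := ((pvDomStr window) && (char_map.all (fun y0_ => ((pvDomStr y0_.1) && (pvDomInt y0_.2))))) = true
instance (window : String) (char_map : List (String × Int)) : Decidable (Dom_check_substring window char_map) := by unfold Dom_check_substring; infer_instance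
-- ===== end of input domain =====

-- B replaces A's build-count-table-then-verify scheme with incremental deficit tracking
-- (a positive-max need table plus a running 'missing' total consumed by the window); objective: alternative.

-- ===== PORT A =====
-- second loop of A: for char, count in char_map.items(): if window_count.get(char,0) < count: return False
def csLoopA (wc : PySem.Dict String Int) : List (String × Int) → Bool
  | [] => true
  | (ch, cnt) :: rest => if wc.getD ch 0 < cnt then false else csLoopA wc rest

def check_substring (window : String) (char_map : List (String × Int)) : Bool :=
  -- first loop: window_count[char] = window_count.get(char, 0) + 1  (each char of the window is a 1-char string)
  let wc := (window.toList.map (fun c => String.ofList [c])).foldl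
      (fun d x => d.insert x (d.getD x 0 + 1)) PySem.Dict.empty
  csLoopA wc char_map

-- ===== PORT B =====
-- need-building loop: if count > need.get(char, 0): need[char] = count
def csNeed (char_map : List (String × Int)) : PySem.Dict String Int :=
  char_map.foldl (fun d p => if d.getD p.1 0 < p.2 then d.insert p.1 p.2 else d) PySem.Dict.empty

-- window loop body: r = need.get(c, 0); if r > 0: need[c] = r - 1; missing -= 1
def csStepB (st : PySem.Dict String Int × Int) (k : String) : PySem.Dict String Int × Int :=
  if 0 < st.1.getD k 0 then (st.1.insert k (st.1.getD k 0 - 1), st.2 - 1) else st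

def check_substring_alt (window : String) (char_map : List (String × Int)) : Bool :=
  let need := csNeed char_map
  let missing := need.values.sum
  let st := (window.toList.map (fun c => String.ofList [c])).foldl csStepB (need, missing)
  st.2 == 0

-- ===== PRECONDITION & SPEC =====
def Spec_check_substring (window : String) (char_map : List (String × Int)) (out : Bool) : Prop := out = check_substring_alt window char_map
instance (window : String) (char_map : List (String × Int)) (out : Bool) : Decidable (Spec_check_substring window char_map out) := by unfold Spec_check_substring; infer_instance

-- ===== CLAIM (what is proved, stated in full; the proofs are below) =====
def Claim_equal_check_substring : Prop := ∀ (window : String) (char_map : List (String × Int)), Dom_check_substring window char_map → Spec_check_substring window char_map (check_substring window char_map)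

-- ===== LEMMAS AND PROOFS =====

-- A's verification loop succeeds iff every requirement pair is met by the count table.
lemma csLoopA_eq_true_iff (wc : PySem.Dict String Int) (cm : List (String × Int)) :
    csLoopA wc cm = true ↔ ∀ p ∈ cm, ¬ (wc.getD p.1 0 < p.2) := by
  induction cm with
  | nil => simp [csLoopA]
  | cons p rest ih =>
    obtain ⟨ch, cnt⟩ := p
    by_cases h : wc.getD ch 0 < cnt
    · simp only [csLoopA, if_pos h]
      constructor
      · intro hfalse; cases hfalse
      · intro hall; exact absurd h (hall (ch, cnt) (List.mem_cons_self ..))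
    · simp only [csLoopA, if_neg h, ih]
      constructor
      · intro hr p hp
        rcases List.mem_cons.mp hp with h1 | h2
        · rw [h1]; exact h
        · exact hr p h2
      · intro hall p hp
        exact hall p (List.mem_cons_of_mem _ hp)

-- the need table's keys stay Nodup through the conditional-insert loop
lemma csNeed_nodup_aux (cm : List (String × Int)) (d : PySem.Dict String Int)
    (h : d.keys.Nodup) :
    (cm.foldl (fun d p => if d.getD p.1 0 < p.2 then d.insert p.1 p.2 else d) d).keys.Nodup := by
  induction cm generalizing d with
  | nil => simpa
  | cons p rest ih =>
    simp only [List.foldl_cons]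
    split
    · exact ih _ (PySem.Dict.nodup_keys_insert _ _ _ h)
    · exact ih _ h

-- per-key value of the need-building loop: a running maximum over pairs with that key
lemma csNeed_getD_aux (cm : List (String × Int)) (k : String) (d : PySem.Dict String Int) :
    (cm.foldl (fun d p => if d.getD p.1 0 < p.2 then d.insert p.1 p.2 else d) d).getD k 0
      = cm.foldl (fun v p => if p.1 = k then max v p.2 else v) (d.getD k 0) := by
  induction cm generalizing d with
  | nil => rfl
  | cons p rest ih =>
    obtain ⟨ch, cnt⟩ := p
    simp only [List.foldl_cons]
    by_cases hlt : d.getD ch 0 < cnt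
    · rw [if_pos hlt, ih]
      by_cases hk : ch = k
      · subst hk
        rw [if_pos rfl, PySem.Dict.getD_insert_self, max_eq_right (le_of_lt hlt)]
      · rw [if_neg hk, PySem.Dict.getD_insert_of_ne _ _ _ (fun h => hk h.symm)]
    · rw [if_neg hlt, ih]
      by_cases hk : ch = k
      · subst hk; rw [if_pos rfl, max_eq_left (not_lt.mp hlt)]
      · rw [if_neg hk]

lemma maxFold_ge_init (cm : List (String × Int)) (k : String) (v : Int) :
    v ≤ cm.foldl (fun v p => if p.1 = k then max v p.2 else v) v := by
  induction cm generalizing v with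
  | nil => simp
  | cons p rest ih =>
    simp only [List.foldl_cons]
    split
    · exact le_trans (le_max_left _ _) (ih _)
    · exact ih _

lemma maxFold_ge_mem (cm : List (String × Int)) (k : String) (cnt : Int)
    (h : (k, cnt) ∈ cm) (v : Int) :
    cnt ≤ cm.foldl (fun v p => if p.1 = k then max v p.2 else v) v := by
  induction cm generalizing v with
  | nil => cases h
  | cons p rest ih =>
    simp only [List.foldl_cons]
    rcases List.mem_cons.mp h with h1 | h2
    · subst h1
      rw [if_pos rfl]
      exact le_trans (le_max_right _ _) (maxFold_ge_init rest k _)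
    · split
      · exact ih h2 _
      · exact ih h2 _

lemma maxFold_le (cm : List (String × Int)) (k : String) (v b : Int)
    (hv : v ≤ b) (h : ∀ p ∈ cm, p.1 = k → p.2 ≤ b) :
    cm.foldl (fun v p => if p.1 = k then max v p.2 else v) v ≤ b := by
  induction cm generalizing v with
  | nil => simpa
  | cons p rest ih =>
    simp only [List.foldl_cons]
    by_cases hk : p.1 = k
    · rw [if_pos hk]
      exact ih _ (max_le hv (h p (List.mem_cons_self ..) hk))
        (fun q hq => h q (List.mem_cons_of_mem _ hq))
    · rw [if_neg hk]
      exact ih _ hv (fun q hq => h q (List.mem_cons_of_mem _ hq))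

-- sum over the key list after overwriting one present key
lemma sum_map_getD_insert (ks : List String) (d : PySem.Dict String Int) (k : String)
    (w : Int) (hnd : ks.Nodup) (hk : k ∈ ks) :
    (ks.map (fun j => (d.insert k w).getD j 0)).sum
      = (ks.map (fun j => d.getD j 0)).sum + (w - d.getD k 0) := by
  induction ks with
  | nil => cases hk
  | cons a rest ih =>
    rcases List.mem_cons.mp hk with h1 | h2
    · subst h1
      have hrest : ∀ j ∈ rest, (d.insert k w).getD j 0 = d.getD j 0 := by
        intro j hj
        exact PySem.Dict.getD_insert_of_ne _ _ _
          (fun he => (List.nodup_cons.mp hnd).1 (he ▸ hj))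
      simp only [List.map_cons, List.sum_cons, PySem.Dict.getD_insert_self,
        List.map_congr_left hrest]
      ring
    · have ha : a ≠ k := fun he => (List.nodup_cons.mp hnd).1 (he ▸ h2)
      simp only [List.map_cons, List.sum_cons,
        PySem.Dict.getD_insert_of_ne _ _ _ ha, ih (List.nodup_cons.mp hnd).2 h2]
      ring

-- shorthand used by the invariant lemmas
def csSumKeys (d : PySem.Dict String Int) : Int :=
  (d.keys.map (fun j => d.getD j 0)).sum

lemma contains_of_getD_pos (d : PySem.Dict String Int) (k : String)
    (h : 0 < d.getD k 0) : d.contains k = true := by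
  by_contra hc
  rw [PySem.Dict.getD_of_not_contains d 0 (Bool.not_eq_true _ ▸ hc)] at h
  exact absurd h (by omega)

lemma csStepB_keys (st : PySem.Dict String Int × Int) (k : String) :
    (csStepB st k).1.keys = st.1.keys := by
  unfold csStepB
  split
  · next h =>
    exact PySem.Dict.keys_insert_of_contains _ _ (contains_of_getD_pos _ _ h)
  · rfl

lemma csLoopB_keys (ws : List String) (st : PySem.Dict String Int × Int) :
    (ws.foldl csStepB st).1.keys = st.1.keys := by
  induction ws generalizing st with
  | nil => rfl
  | cons c rest ih =>
    simp only [List.foldl_cons]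
    rw [ih, csStepB_keys]

-- the global invariant: missing minus the table's total deficit is preserved by the window loop
lemma csLoopB_invariant (ws : List String) (d : PySem.Dict String Int) (m : Int)
    (hnd : d.keys.Nodup) :
    (ws.foldl csStepB (d, m)).2 - csSumKeys (ws.foldl csStepB (d, m)).1
      = m - csSumKeys d := by
  induction ws generalizing d m with
  | nil => simp
  | cons c rest ih =>
    simp only [List.foldl_cons]
    by_cases h : 0 < d.getD c 0
    · have hc : d.contains c = true := contains_of_getD_pos _ _ h
      have hkmem : c ∈ d.keys := (PySem.Dict.contains_iff_mem_keys _ _).mp hc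
      have hstep : csStepB (d, m) c = (d.insert c (d.getD c 0 - 1), m - 1) := by
        unfold csStepB; rw [if_pos h]
      rw [hstep, ih _ _ (by
        rw [PySem.Dict.keys_insert_of_contains _ _ hc]; exact hnd)]
      have hsum : csSumKeys (d.insert c (d.getD c 0 - 1)) = csSumKeys d - 1 := by
        unfold csSumKeys
        rw [PySem.Dict.keys_insert_of_contains _ _ hc,
          sum_map_getD_insert d.keys d c _ hnd hkmem]
        ring
      rw [hsum]; ring
    · have hstep : csStepB (d, m) c = (d, m) := by unfold csStepB; rw [if_neg h]
      rw [hstep, ih _ _ hnd]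

-- per-key effect of the window loop: decrement while positive
lemma csLoopB_getD (ws : List String) (d : PySem.Dict String Int) (m : Int) (k : String) :
    (ws.foldl csStepB (d, m)).1.getD k 0
      = ws.foldl (fun v c => if c = k ∧ 0 < v then v - 1 else v) (d.getD k 0) := by
  induction ws generalizing d m with
  | nil => rfl
  | cons c rest ih =>
    simp only [List.foldl_cons]
    by_cases h : 0 < d.getD c 0
    · have hstep : csStepB (d, m) c = (d.insert c (d.getD c 0 - 1), m - 1) := by
        unfold csStepB; rw [if_pos h]
      rw [hstep, ih]
      by_cases hk : c = k
      · subst hk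
        rw [if_pos ⟨rfl, h⟩, PySem.Dict.getD_insert_self]
      · rw [if_neg (by tauto), PySem.Dict.getD_insert_of_ne _ _ _ (fun he => hk he.symm)]
    · have hstep : csStepB (d, m) c = (d, m) := by unfold csStepB; rw [if_neg h]
      rw [hstep, ih]
      by_cases hk : c = k
      · subst hk; rw [if_neg (by tauto)]
      · rw [if_neg (by tauto)]

-- decrement-while-positive from a nonnegative start is truncated subtraction of the count
lemma decFold_eq_max (ws : List String) (k : String) (v : Int) (hv : 0 ≤ v) :
    ws.foldl (fun v c => if c = k ∧ 0 < v then v - 1 else v) v = max 0 (v - ws.count k) := by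
  induction ws generalizing v with
  | nil => simp only [List.foldl_nil, List.count_nil, Nat.cast_zero, sub_zero]; omega
  | cons c rest ih =>
    simp only [List.foldl_cons, List.count_cons]
    by_cases hk : c = k
    · subst hk
      by_cases h : 0 < v
      · rw [if_pos ⟨rfl, h⟩, ih _ (by omega)]
        simp only [beq_self_eq_true, if_pos, Nat.cast_add, Nat.cast_one]
        omega
      · rw [if_neg (by tauto), ih _ hv]
        simp only [beq_self_eq_true, if_pos, Nat.cast_add, Nat.cast_one]
        omega
    · rw [if_neg (by tauto), ih _ hv]
      have : (c == k) = false := by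
        simp only [beq_eq_false_iff_ne, ne_eq]; exact hk
      rw [this]
      simp
lemma sum_eq_zero_iff_of_nonneg (l : List Int) (h : ∀ x ∈ l, 0 ≤ x) :
    l.sum = 0 ↔ ∀ x ∈ l, x = 0 := by
  induction l with
  | nil => simp
  | cons a t ih =>
    have ha := h a (List.mem_cons_self ..)
    have ht : ∀ x ∈ t, 0 ≤ x := fun x hx => h x (List.mem_cons_of_mem _ hx)
    have hts : 0 ≤ t.sum := List.sum_nonneg ht
    rw [List.sum_cons]
    constructor
    · intro hz
      have ha0 : a = 0 := by omega
      have hs0 : t.sum = 0 := by omega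
      intro x hx
      rcases List.mem_cons.mp hx with h1 | h2
      · rw [h1, ha0]
      · exact (ih ht).mp hs0 x h2
    · intro hall
      rw [hall a (List.mem_cons_self ..), zero_add]
      exact (ih ht).mpr (fun x hx => hall x (List.mem_cons_of_mem _ hx))

-- need values are nonnegative
lemma csNeed_getD_nonneg (cm : List (String × Int)) (k : String) :
    0 ≤ (csNeed cm).getD k 0 := by
  rw [csNeed, csNeed_getD_aux, show (PySem.Dict.empty : PySem.Dict String Int).getD k 0 = 0 from rfl]
  exact maxFold_ge_init cm k 0

-- positive need value means the key is present
lemma csNeed_mem_keys_of_pos (cm : List (String × Int)) (k : String)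
    (h : 0 < (csNeed cm).getD k 0) : k ∈ (csNeed cm).keys :=
  (PySem.Dict.contains_iff_mem_keys _ _).mp (contains_of_getD_pos _ _ h)

-- the core equivalence, phrased over the mapped window list
lemma cs_main (wl : List String) (cm : List (String × Int)) :
    ((wl.foldl csStepB (csNeed cm, (csNeed cm).values.sum)).2 == 0)
      = csLoopA (wl.foldl (fun d x => d.insert x (d.getD x 0 + 1)) PySem.Dict.empty) cm := by
  have hnd : (csNeed cm).keys.Nodup := csNeed_nodup_aux cm _ PySem.Dict.nodup_keys_empty
  have hwc : ∀ k, (wl.foldl (fun d x => d.insert x (d.getD x 0 + 1)) PySem.Dict.empty).getD k 0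
      = (wl.count k : Int) := by
    intro k
    rw [PySem.Dict.getD_foldl_insert_add_one, PySem.Dict.getD_empty, zero_add]
  have hvals : (csNeed cm).values.sum = csSumKeys (csNeed cm) := by
    unfold csSumKeys
    rw [PySem.Dict.values_eq_map_keys _ hnd 0]
  have hfinal2 : (wl.foldl csStepB (csNeed cm, (csNeed cm).values.sum)).2
      = csSumKeys (wl.foldl csStepB (csNeed cm, (csNeed cm).values.sum)).1 := by
    have := csLoopB_invariant wl (csNeed cm) ((csNeed cm).values.sum) hnd
    omega
  have hgetD : ∀ k, (wl.foldl csStepB (csNeed cm, (csNeed cm).values.sum)).1.getD k 0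
      = max 0 ((csNeed cm).getD k 0 - (wl.count k : Int)) := by
    intro k
    rw [csLoopB_getD, decFold_eq_max wl k _ (csNeed_getD_nonneg cm k)]
  rw [Bool.eq_iff_iff, beq_iff_eq, csLoopA_eq_true_iff, hfinal2]
  unfold csSumKeys
  rw [csLoopB_keys]
  have hnn : ∀ x ∈ (csNeed cm).keys.map
      (fun j => (wl.foldl csStepB (csNeed cm, (csNeed cm).values.sum)).1.getD j 0), 0 ≤ x := by
    intro x hx
    obtain ⟨j, _, rfl⟩ := List.mem_map.mp hx
    rw [hgetD]
    exact le_max_left _ _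
  rw [sum_eq_zero_iff_of_nonneg _ hnn]
  constructor
  · -- B true → A true
    intro hall p hp
    rw [hwc]
    by_cases hpos : 0 < p.2
    · have hge : p.2 ≤ (csNeed cm).getD p.1 0 := by
        rw [csNeed, csNeed_getD_aux,
          show (PySem.Dict.empty : PySem.Dict String Int).getD p.1 0 = 0 from rfl]
        exact maxFold_ge_mem cm p.1 p.2 (by rcases p with ⟨a, b⟩; exact hp) 0
      have hmem : p.1 ∈ (csNeed cm).keys := csNeed_mem_keys_of_pos cm p.1 (by omega)
      have hzero := hall _ (List.mem_map_of_mem hmem)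
      rw [hgetD] at hzero
      omega
    · have : (0 : Int) ≤ (wl.count p.1 : Int) := Int.natCast_nonneg _
      omega
  · -- A true → B true
    intro hall x hx
    obtain ⟨j, hj, rfl⟩ := List.mem_map.mp hx
    rw [hgetD]
    have hle : (csNeed cm).getD j 0 ≤ (wl.count j : Int) := by
      rw [csNeed, csNeed_getD_aux,
        show (PySem.Dict.empty : PySem.Dict String Int).getD j 0 = 0 from rfl]
      apply maxFold_le cm j 0 _ (Int.natCast_nonneg _)
      intro q hq hqk
      have hq2 := hall q hq
      rw [hwc, hqk] at hq2
      omega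
    omega

-- ===== VERDICT (by name: the statement is the Claim_ definition above) =====
theorem check_substring_spec : Claim_equal_check_substring := by
  intro window char_map _
  unfold Spec_check_substring check_substring check_substring_alt
  exact (cs_main (window.toList.map (fun c => String.ofList [c])) char_map).symm
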